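-- pv_equiv track=rewrite | github.com/lichtmic/PAD-Genomic_Sequence_Clustering | P1.py | extract_lines_starting_with_greater_than
-- ===== SOURCE A (Python) =====
-- def extract_lines_starting_with_greater_than(content):
--     """
--     Extract and parse lines that start with '>' character.
--
--     Lines starting with '>' contain sequence data (label and nucleotides).
--     Empty lines are skipped. Non-empty lines not starting with '>' are invalid.
--
--     Args:
--         content (str): File content as a single string
--
--     Returns:
--         list[str]: List of parsed data lines (without the '>' prefix)
--
--     Raises:
--         Exception: If non-empty line doesn't start with '>', raises "malformed input"
--     """
--     lines = content.split('\n')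
--     result = []
--     for line in lines:
--         line = line.strip()
--         if line.startswith('>'):
--             line = line[1:].strip()
--             if not line:  # Check if empty after removing '>'
--                 raise Exception("malformed input")
--             result.append(line)
--         elif line:  # Non-empty line that doesn't start with '>'
--             raise Exception("malformed input")
--     return result
-- ===== SOURCE B (Python) =====
-- def extract_lines_starting_with_greater_than(content):
--     stripped = [l.strip() for l in content.split('\n')]
--     nonempty = [l for l in stripped if l]
--     if any(not l.startswith('>') for l in nonempty):
--         raise Exception("malformed input")
--     parsed = [l[1:].strip() for l in nonempty]
--     if any(not p for p in parsed):
--         raise Exception("malformed input")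
--     return parsed
-- ===== Notes on version B (the rewrite author's own statement) =====
-- stated objective: simpler
-- what changed: Replaced A's single interleaved validate-and-collect loop with early raises by a pipeline of sequential passes: strip all lines, filter non-empty, validate the '>' prefix in one pass, map off the prefix, validate non-emptiness of the results, return.
import Mathlib
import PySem

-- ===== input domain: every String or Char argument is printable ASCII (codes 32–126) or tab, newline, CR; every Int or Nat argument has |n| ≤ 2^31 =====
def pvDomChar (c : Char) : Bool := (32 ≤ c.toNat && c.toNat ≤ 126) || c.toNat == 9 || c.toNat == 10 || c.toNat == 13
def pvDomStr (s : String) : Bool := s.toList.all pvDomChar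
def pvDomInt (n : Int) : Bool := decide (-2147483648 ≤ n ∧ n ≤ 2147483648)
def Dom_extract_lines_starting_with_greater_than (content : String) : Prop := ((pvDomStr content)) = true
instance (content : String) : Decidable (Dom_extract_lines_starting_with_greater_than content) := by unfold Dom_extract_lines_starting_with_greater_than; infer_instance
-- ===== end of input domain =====

-- B restructures A's single interleaved validate-and-collect loop into sequential passes
-- (strip, filter, validate prefix, map, validate results); return value proved equal on Pre_.

-- ===== PORT A =====
-- A's loop with two raise sites: 'none' encodes the exception, state = (remaining lines, result so far).
def pvGoA : List String → List String → Option (List String)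
  | [], acc => some acc
  | l :: rest, acc =>
    let line := PySem.Str.strip l
    if PySem.Str.startswith line ">" then
      let line2 := PySem.Str.strip (PySem.Str.slice line (some 1) none)
      if line2 = "" then none                 -- raise Exception("malformed input")
      else pvGoA rest (acc ++ [line2])
    else if line ≠ "" then none               -- raise Exception("malformed input")
    else pvGoA rest acc

def extract_lines_starting_with_greater_than (content : String) : List String :=
  (pvGoA ((PySem.Str.split? content "\n").getD []) []).getD []

-- ===== PORT B =====
def extract_lines_starting_with_greater_than_alt (content : String) : List String :=
  let stripped := ((PySem.Str.split? content "\n").getD []).map PySem.Str.strip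
  let nonempty := stripped.filter (fun l => l != "")
  if nonempty.any (fun l => !(PySem.Str.startswith l ">")) then []   -- raise Exception("malformed input")
  else
    let parsed := nonempty.map (fun l => PySem.Str.strip (PySem.Str.slice l (some 1) none))
    if parsed.any (fun p => p == "") then []                          -- raise Exception("malformed input")
    else parsed

-- ===== PRECONDITION & SPEC =====
-- Pre_ excludes exactly the inputs on which A raises Exception("malformed input"):
-- some non-empty stripped line does not start with '>' or is empty after removing '>'.
def Pre_extract_lines_starting_with_greater_than (content : String) : Prop :=
  ∀ l ∈ (PySem.Str.split? content "\n").getD [],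
    PySem.Str.strip l = "" ∨
    (PySem.Str.startswith (PySem.Str.strip l) ">" = true ∧
     PySem.Str.strip (PySem.Str.slice (PySem.Str.strip l) (some 1) none) ≠ "")
instance (content : String) : Decidable (Pre_extract_lines_starting_with_greater_than content) := by
  unfold Pre_extract_lines_starting_with_greater_than; infer_instance

def pvWitness_extract_lines_starting_with_greater_than : String := ">a b\n\n  >c  \n"

def Spec_extract_lines_starting_with_greater_than (content : String) (out : List String) : Prop := out = extract_lines_starting_with_greater_than_alt content
instance (content : String) (out : List String) : Decidable (Spec_extract_lines_starting_with_greater_than content out) := by unfold Spec_extract_lines_starting_with_greater_than; infer_instance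

-- ===== CLAIM (what is proved, stated in full; the proofs are below) =====
def Claim_equal_extract_lines_starting_with_greater_than : Prop := ∀ (content : String), Dom_extract_lines_starting_with_greater_than content → Pre_extract_lines_starting_with_greater_than content → Spec_extract_lines_starting_with_greater_than content (extract_lines_starting_with_greater_than content)

-- ===== LEMMAS AND PROOFS =====

-- shorthand for the per-line condition of Pre_
def pvOk (l : String) : Prop :=
  PySem.Str.strip l = "" ∨
  (PySem.Str.startswith (PySem.Str.strip l) ">" = true ∧
   PySem.Str.strip (PySem.Str.slice (PySem.Str.strip l) (some 1) none) ≠ "")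

lemma pvGoA_eq (lines : List String) (h : ∀ l ∈ lines, pvOk l) (acc : List String) :
    pvGoA lines acc =
      some (acc ++ ((lines.map PySem.Str.strip).filter (fun l => l != "")).map
        (fun l => PySem.Str.strip (PySem.Str.slice l (some 1) none))) := by
  induction lines generalizing acc with
  | nil => simp [pvGoA]
  | cons l rest ih =>
    have hl := h l (by simp)
    have hrest : ∀ x ∈ rest, pvOk x := fun x hx => h x (by simp [hx])
    rcases hl with he | ⟨hs, hne⟩
    · simp [pvGoA, he, ih hrest]
      decide
    · have hs' : PySem.Chars.startswith (PySem.Chars.strip l.toList) ['>'] = true := by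
        simpa using hs
      have hlnz : (PySem.Str.strip l != "") = true := by
        simp only [bne_iff_ne, ne_eq]
        intro he; rw [he] at hs; exact absurd hs (by decide)
      simp [pvGoA, hs', hne, ih hrest, hlnz]

lemma pvAlt_eq (content : String)
    (h : ∀ l ∈ (PySem.Str.split? content "\n").getD [], pvOk l) :
    extract_lines_starting_with_greater_than_alt content =
      ((((PySem.Str.split? content "\n").getD []).map PySem.Str.strip).filter (fun l => l != "")).map
        (fun l => PySem.Str.strip (PySem.Str.slice l (some 1) none)) := by
  unfold extract_lines_starting_with_greater_than_alt
  have h1 : ((((PySem.Str.split? content "\n").getD []).map PySem.Str.strip).filter (fun l => l != "")).any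
      (fun l => !(PySem.Str.startswith l ">")) = false := by
    simp only [List.any_eq_false, List.mem_filter, List.mem_map]
    rintro s ⟨⟨l, hl, rfl⟩, hne⟩
    rcases h l hl with he | ⟨hs, _⟩
    · simp [he] at hne
    · simpa using hs
  have h2 : (((((PySem.Str.split? content "\n").getD []).map PySem.Str.strip).filter (fun l => l != "")).map
      (fun l => PySem.Str.strip (PySem.Str.slice l (some 1) none))).any (fun p => p == "") = false := by
    simp only [List.any_eq_false, List.mem_map, List.mem_filter]
    rintro s ⟨l, ⟨⟨x, hx, rfl⟩, hne⟩, rfl⟩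
    rcases h x hx with he | ⟨_, hd⟩
    · simp [he] at hne
    · simpa using hd
  simp only [h1, h2, if_false, Bool.false_eq_true]

-- ===== VERDICT (by name: the statement is the Claim_ definition above) =====
theorem extract_lines_starting_with_greater_than_spec : Claim_equal_extract_lines_starting_with_greater_than := by
  intro content _ hpre
  have h : ∀ l ∈ (PySem.Str.split? content "\n").getD [], pvOk l := hpre
  unfold Spec_extract_lines_starting_with_greater_than
  unfold extract_lines_starting_with_greater_than
  rw [pvGoA_eq _ h [], pvAlt_eq content h]
  simp
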